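-- pv_equiv track=rewrite | github.com/naraic/adventofcode | 2019/3/3a.py | check
-- ===== SOURCE A (Python) =====
-- def overlap(h_line, v_line):
--     (h_xs, h_y1), (_, h_y2) = h_line
--     (v_x1, v_ys), (v_x2, _) = v_line
--     if min(v_x1, v_x2) <= h_xs <= max(v_x1, v_x2) and \
--        min(h_y1, h_y2) <= v_ys <= max(h_y1, h_y2):
--         return (h_xs, v_ys)
--     else:
--         return None
--
-- def check(verticals, horizontals):
--     overlaps = []
--     for v_line in verticals:
--         for h_line in horizontals:
--             res = overlap(v_line, h_line)
--             if res:
--                 overlaps.append(res)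
--     return overlaps
-- ===== SOURCE B (Python) =====
-- def check(verticals, horizontals):
--     # sort horizontals by y once, then per vertical scan only the y-prefix up to hi
--     # (early break), restoring per-vertical original horizontal order via the index.
--     hs = [(h[0][1], i, min(h[0][0], h[1][0]), max(h[0][0], h[1][0]))
--           for i, h in enumerate(horizontals)]
--     hs.sort(key=lambda t: t[0])
--     out = []
--     for v in verticals:
--         x = v[0][0]
--         lo = min(v[0][1], v[1][1])
--         hi = max(v[0][1], v[1][1])
--         cands = []
--         for (y, i, xmin, xmax) in hs:
--             if y > hi:
--                 break
--             if y >= lo and xmin <= x <= xmax: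
--                 cands.append((i, y))
--         cands.sort(key=lambda c: c[0])
--         out.extend((x, y) for i, y in cands)
--     return out
-- ===== Notes on version B (the rewrite author's own statement) =====
-- stated objective: faster
-- what changed: Instead of testing every vertical against every horizontal, B pre-sorts the horizontals by y (with precomputed x-spans and original indices), per vertical scans only the sorted prefix with y <= hi and breaks early, then restores the original horizontal order by sorting the hits by index.
import Mathlib
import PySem

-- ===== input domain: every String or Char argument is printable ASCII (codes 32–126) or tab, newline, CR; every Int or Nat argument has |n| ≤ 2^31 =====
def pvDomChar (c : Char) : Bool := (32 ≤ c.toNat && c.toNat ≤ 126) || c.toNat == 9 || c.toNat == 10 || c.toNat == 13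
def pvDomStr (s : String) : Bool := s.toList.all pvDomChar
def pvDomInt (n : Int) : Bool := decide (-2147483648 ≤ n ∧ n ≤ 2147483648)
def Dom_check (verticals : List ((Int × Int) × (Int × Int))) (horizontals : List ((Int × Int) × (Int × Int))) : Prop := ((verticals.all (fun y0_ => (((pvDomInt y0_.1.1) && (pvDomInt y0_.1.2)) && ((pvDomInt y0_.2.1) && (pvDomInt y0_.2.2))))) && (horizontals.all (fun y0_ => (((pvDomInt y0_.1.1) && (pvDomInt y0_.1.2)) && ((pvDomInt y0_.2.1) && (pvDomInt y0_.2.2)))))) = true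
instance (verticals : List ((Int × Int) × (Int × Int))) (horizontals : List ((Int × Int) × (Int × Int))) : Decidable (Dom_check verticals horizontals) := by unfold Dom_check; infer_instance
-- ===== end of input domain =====

-- B replaces A's all-pairs scan by sorting horizontals by y once and, per vertical, scanning only the y ≤ hi prefix (early break), re-sorting hits by original index; measured faster (constant-factor/output-sensitive).


-- ===== PORT A =====
def overlap (h_line : (Int × Int) × (Int × Int)) (v_line : (Int × Int) × (Int × Int)) : Option (Int × Int) :=
  let h_xs := h_line.1.1
  let h_y1 := h_line.1.2
  let h_y2 := h_line.2.2
  let v_x1 := v_line.1.1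
  let v_ys := v_line.1.2
  let v_x2 := v_line.2.1
  if min v_x1 v_x2 ≤ h_xs ∧ h_xs ≤ max v_x1 v_x2 ∧
     min h_y1 h_y2 ≤ v_ys ∧ v_ys ≤ max h_y1 h_y2 then
    some (h_xs, v_ys)
  else
    none

def check (verticals : List ((Int × Int) × (Int × Int))) (horizontals : List ((Int × Int) × (Int × Int))) : List (Int × Int) :=
  verticals.foldl (fun overlaps v_line =>
    horizontals.foldl (fun acc h_line =>
      match overlap v_line h_line with
      | some res => acc ++ [res]
      | none => acc) overlaps) []

-- ===== PORT B =====
-- the inner 'for (y, i, xmin, xmax) in hs: if y > hi: break; if …: cands.append((i, y))' loop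
def scanCands (x lo hi : Int) : List (Int × Int × Int × Int) → List (Int × Int)
  | [] => []
  | t :: rest =>
    if hi < t.1 then []
    else if lo ≤ t.1 ∧ t.2.2.1 ≤ x ∧ x ≤ t.2.2.2 then
      (t.2.1, t.1) :: scanCands x lo hi rest
    else
      scanCands x lo hi rest

def check_alt (verticals : List ((Int × Int) × (Int × Int))) (horizontals : List ((Int × Int) × (Int × Int))) : List (Int × Int) :=
  let hs := PySem.List.sorted
    ((PySem.List.enumerate horizontals).map
      (fun p => (p.2.1.2, p.1, min p.2.1.1 p.2.2.1, max p.2.1.1 p.2.2.1)))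
    (fun t => t.1) false
  verticals.foldl (fun out v =>
    let x := v.1.1
    let lo := min v.1.2 v.2.2
    let hi := max v.1.2 v.2.2
    let cands := scanCands x lo hi hs
    out ++ (PySem.List.sorted cands (fun c => c.1) false).map (fun c => (x, c.2))) []

-- ===== PRECONDITION & SPEC =====
def Spec_check (verticals : List ((Int × Int) × (Int × Int))) (horizontals : List ((Int × Int) × (Int × Int))) (out : List (Int × Int)) : Prop := out = check_alt verticals horizontals
instance (verticals : List ((Int × Int) × (Int × Int))) (horizontals : List ((Int × Int) × (Int × Int))) (out : List (Int × Int)) : Decidable (Spec_check verticals horizontals out) := by unfold Spec_check; infer_instance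

-- ===== CLAIM (what is proved, stated in full; the proofs are below) =====
def Claim_equal_check : Prop := ∀ (verticals : List ((Int × Int) × (Int × Int))) (horizontals : List ((Int × Int) × (Int × Int))), Dom_check verticals horizontals → Spec_check verticals horizontals (check verticals horizontals)

-- ===== LEMMAS AND PROOFS =====
-- per-vertical test on a horizontal segment, as A tests it (proof-only helper)
def condA (x lo hi : Int) (h : (Int × Int) × (Int × Int)) : Bool :=
  decide (min h.1.1 h.2.1 ≤ x ∧ x ≤ max h.1.1 h.2.1 ∧ lo ≤ h.1.2 ∧ h.1.2 ≤ hi)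

theorem scanCands_eq_filter (x lo hi : Int) (hs : List (Int × Int × Int × Int))
    (hsorted : hs.Pairwise (fun a b => a.1 ≤ b.1)) :
    scanCands x lo hi hs
      = (hs.filter (fun t => decide (t.1 ≤ hi ∧ lo ≤ t.1 ∧ t.2.2.1 ≤ x ∧ x ≤ t.2.2.2))).map
          (fun t => (t.2.1, t.1)) := by
  induction hs with
  | nil => rfl
  | cons a rest ih =>
    rcases List.pairwise_cons.mp hsorted with ⟨ha, htail⟩
    by_cases hbr : hi < a.1
    · have : ∀ t ∈ a :: rest, ¬ ((fun t : Int × Int × Int × Int => decide (t.1 ≤ hi ∧ lo ≤ t.1 ∧ t.2.2.1 ≤ x ∧ x ≤ t.2.2.2)) t = true) := by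
        intro t ht
        simp only [decide_eq_true_eq]
        rintro ⟨h1, -⟩
        rcases List.mem_cons.mp ht with rfl | ht'
        · omega
        · have := ha t ht'; omega
      rw [List.filter_eq_nil_iff.mpr (by intro t ht h; exact this t ht h)]
      simp [scanCands, hbr]
    · by_cases hc : lo ≤ a.1 ∧ a.2.2.1 ≤ x ∧ x ≤ a.2.2.2
      · simp only [scanCands, if_neg hbr, if_pos hc, List.filter_cons,
          decide_eq_true_eq]
        rw [if_pos (by exact ⟨by omega, hc⟩)]
        simp [ih htail]
      · simp only [scanCands, if_neg hbr, if_neg hc, List.filter_cons, decide_eq_true_eq]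
        rw [if_neg (by rintro ⟨-, h⟩; exact hc h)]
        exact ih htail

theorem filter_enumerate_map_snd {α : Type} (c : α → Bool) (xs : List α) (s : Int) :
    ((PySem.List.enumerate xs s).filter (fun p => c p.2)).map (fun p => p.2) = xs.filter c := by
  induction xs generalizing s with
  | nil => rfl
  | cons y ys ih =>
    rw [PySem.List.enumerate_cons, List.filter_cons, List.filter_cons]
    by_cases h : c y
    · simp [h, ih (s+1)]
    · simp [h, ih (s+1)]

theorem inner_eq (x lo hi : Int) (horizontals : List ((Int × Int) × (Int × Int))) :
    (PySem.List.sorted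
        (scanCands x lo hi
          (PySem.List.sorted
            ((PySem.List.enumerate horizontals).map
              (fun p => (p.2.1.2, p.1, min p.2.1.1 p.2.2.1, max p.2.1.1 p.2.2.1)))
            (fun t => t.1) false))
        (fun c => c.1) false).map (fun c => (x, c.2))
      = (horizontals.filter (fun h => condA x lo hi h)).map (fun h => (x, h.1.2)) := by
  set f : (Int × ((Int × Int) × (Int × Int))) → (Int × Int × Int × Int) :=
    fun p => (p.2.1.2, p.1, min p.2.1.1 p.2.2.1, max p.2.1.1 p.2.2.1) with hf
  set P : (Int × Int × Int × Int) → Bool :=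
    fun t => decide (t.1 ≤ hi ∧ lo ≤ t.1 ∧ t.2.2.1 ≤ x ∧ x ≤ t.2.2.2) with hP
  set es := PySem.List.enumerate horizontals 0 with hes
  set ms := es.map f with hms
  set hs := PySem.List.sorted ms (fun t => t.1) false with hhs
  set T : List (Int × Int) := (es.filter (fun p => condA x lo hi p.2)).map
    (fun p => (p.1, p.2.1.2)) with hT
  -- the scan over the sorted list is the filter over the sorted list
  have hscan : scanCands x lo hi hs = (hs.filter P).map (fun t => (t.2.1, t.1)) :=
    scanCands_eq_filter x lo hi hs (PySem.List.sorted_pairwise ms (fun t => t.1))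
  -- T equals the unsorted filter over ms, mapped
  have hTm : T = (ms.filter P).map (fun t => (t.2.1, t.1)) := by
    rw [hms, List.filter_map, List.map_map, hT]
    have hpred : ∀ p ∈ es, (fun p => condA x lo hi p.2) p = (P ∘ f) p := by
      intro p _
      simp only [hP, hf, Function.comp, condA, decide_eq_decide]
      tauto
    rw [List.filter_congr hpred]
    exact List.map_congr_left (fun p _ => rfl)
  -- strictly index-increasing target
  have hTlt : T.Pairwise (fun a b => a.1 < b.1) := by
    rw [hT]
    refine List.Pairwise.map _ ?_ ((PySem.List.pairwise_lt_enumerate horizontals 0).filter _)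
    intro a b h
    exact h
  -- permutation between the scan result and T
  have hperm : T.Perm (scanCands x lo hi hs) := by
    rw [hscan, hTm]
    exact ((PySem.List.sorted_perm ms (fun t => t.1) false).filter P).map _ |>.symm
  rw [PySem.List.sorted_eq_of_perm_of_pairwise_lt _ T _ hperm hTlt, hT, List.map_map,
    ← filter_enumerate_map_snd (fun h => condA x lo hi h) horizontals 0, List.map_map]
  exact List.map_congr_left (fun p _ => rfl)

theorem checkA_inner (v : (Int × Int) × (Int × Int)) (horizontals : List ((Int × Int) × (Int × Int)))
    (acc : List (Int × Int)) :
    horizontals.foldl (fun acc h_line =>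
      match overlap v h_line with
      | some res => acc ++ [res]
      | none => acc) acc
      = acc ++ (horizontals.filter
          (fun h => condA v.1.1 (min v.1.2 v.2.2) (max v.1.2 v.2.2) h)).map
          (fun h => (v.1.1, h.1.2)) := by
  have hstep : (fun (acc : List (Int × Int)) h_line =>
      match overlap v h_line with
      | some res => acc ++ [res]
      | none => acc)
      = fun acc h => if condA v.1.1 (min v.1.2 v.2.2) (max v.1.2 v.2.2) h = true
          then acc ++ [(v.1.1, h.1.2)] else acc := by
    funext a h
    simp only [overlap, condA]
    by_cases hC : min h.1.1 h.2.1 ≤ v.1.1 ∧ v.1.1 ≤ max h.1.1 h.2.1 ∧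
        min v.1.2 v.2.2 ≤ h.1.2 ∧ h.1.2 ≤ max v.1.2 v.2.2
    · rw [if_pos hC, if_pos (by simpa using hC)]
    · rw [if_neg hC, if_neg (by simpa using hC)]
  rw [hstep, PySem.List.foldl_append_ite]
  congr 1
  apply congrArg
  apply List.filter_congr
  intro h _
  simp

theorem final (verticals horizontals : List ((Int × Int) × (Int × Int))) :
    (verticals.foldl (fun overlaps v_line =>
      horizontals.foldl (fun acc h_line =>
        match overlap v_line h_line with
        | some res => acc ++ [res]
        | none => acc) overlaps) [] : List (Int × Int))
    = verticals.foldl (fun out v =>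
        let x := v.1.1
        let lo := min v.1.2 v.2.2
        let hi := max v.1.2 v.2.2
        let cands := scanCands x lo hi (PySem.List.sorted
          ((PySem.List.enumerate horizontals).map
            (fun p => (p.2.1.2, p.1, min p.2.1.1 p.2.2.1, max p.2.1.1 p.2.2.1)))
          (fun t => t.1) false)
        out ++ (PySem.List.sorted cands (fun c => c.1) false).map (fun c => (x, c.2))) [] := by
  have hA : (fun (overlaps : List (Int × Int)) v_line =>
      horizontals.foldl (fun acc h_line =>
        match overlap v_line h_line with
        | some res => acc ++ [res]
        | none => acc) overlaps)
      = fun overlaps v => overlaps ++ (horizontals.filter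
          (fun h => condA v.1.1 (min v.1.2 v.2.2) (max v.1.2 v.2.2) h)).map
          (fun h => (v.1.1, h.1.2)) := by
    funext acc v
    exact checkA_inner v horizontals acc
  rw [hA]
  apply PySem.List.foldl_congr_mem
  intro acc v _
  show acc ++ _ = acc ++ _
  rw [inner_eq v.1.1 (min v.1.2 v.2.2) (max v.1.2 v.2.2) horizontals]

-- ===== VERDICT (by name: the statement is the Claim_ definition above) =====
theorem check_spec : Claim_equal_check := by
  intro verticals horizontals _
  unfold Spec_check check check_alt
  exact final verticals horizontals
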